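-- pv_equiv track=rewrite | github.com/jangjichang/Today-I-Learn | Algorithm/Programmers/후보키/test_후보키.py | make_combination
-- ===== SOURCE A (Python) =====
-- from itertools import combinations
--
-- def make_combination(number):
--     numbers = [i for i in range(number)]
--     possible_combinations = list()
--
--     for length in range(1, number+1):
--         combination = combinations(numbers, length)
--         for combination_ in combination:
--             possible_combinations.append(combination_)
--
--     return possible_combinations
-- ===== SOURCE B (Python) =====
-- def make_combination(number):
--     result = []
--     layer = [(i,) for i in range(number)]
--     while layer:
--         result.extend(layer)
--         layer = [c + (j,) for c in layer for j in range(c[-1] + 1, number)]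
--     return result
-- ===== Notes on version B (the rewrite author's own statement) =====
-- stated objective: alternative
-- what changed: Replaces the per-length itertools.combinations calls with an iterative layer-by-layer construction: each length's combinations are built by extending every combination of the previous length with each larger element, so no combinatorial library routine and no nested per-length re-enumeration is used.
import Mathlib
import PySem

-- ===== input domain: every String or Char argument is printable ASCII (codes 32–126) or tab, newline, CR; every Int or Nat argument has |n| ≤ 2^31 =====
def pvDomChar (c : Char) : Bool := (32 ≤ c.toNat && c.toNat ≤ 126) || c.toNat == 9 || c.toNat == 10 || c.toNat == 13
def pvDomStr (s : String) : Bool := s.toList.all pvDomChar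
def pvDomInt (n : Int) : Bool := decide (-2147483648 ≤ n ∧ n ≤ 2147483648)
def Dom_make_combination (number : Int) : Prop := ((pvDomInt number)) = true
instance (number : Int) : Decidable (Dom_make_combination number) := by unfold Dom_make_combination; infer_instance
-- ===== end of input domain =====

-- B builds each length's combinations by extending the previous length's list (no itertools); same values in the same order, proved equal for all inputs.

-- ===== PORT A =====
-- itertools.combinations(xs, r) in its lexicographic order
def pvCombosA : Nat → List Int → List (List Int)
  | 0, _ => [[]]
  | _ + 1, [] => []
  | n + 1, x :: xs => (pvCombosA n xs).map (fun c => x :: c) ++ pvCombosA (n + 1) xs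

def make_combination (number : Int) : List (List Int) :=
  let numbers := PySem.List.pyRange 0 number 1
  (PySem.List.pyRange 1 (number + 1) 1).foldl
    (fun acc length =>
      (pvCombosA length.toNat numbers).foldl (fun acc' c => acc' ++ [c]) acc) []

-- ===== PORT B =====
-- '[c + (j,) for j in range(c[-1] + 1, number)]'; every c in a layer is non-empty, so c[-1] is c.getLast?.getD 0
def pvExtend (number : Int) (c : List Int) : List (List Int) :=
  (PySem.List.pyRange (c.getLast?.getD 0 + 1) number 1).map (fun j => c ++ [j])

-- 'while layer: result.extend(layer); layer = …'; the loop runs at most number times, fuel covers it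
def pvLayers (number : Int) : Nat → List (List Int) → List (List Int) → List (List Int)
  | 0, result, _ => result
  | fuel + 1, result, layer =>
      if layer = [] then result
      else pvLayers number fuel (result ++ layer) (layer.flatMap (pvExtend number))

def make_combination_alt (number : Int) : List (List Int) :=
  pvLayers number (number.toNat + 1) []
    ((PySem.List.pyRange 0 number 1).map (fun i => [i]))

-- ===== PRECONDITION & SPEC =====
def Spec_make_combination (number : Int) (out : List (List Int)) : Prop := out = make_combination_alt number
instance (number : Int) (out : List (List Int)) : Decidable (Spec_make_combination number out) := by unfold Spec_make_combination; infer_instance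

-- ===== CLAIM (what is proved, stated in full; the proofs are below) =====
def Claim_equal_make_combination : Prop := ∀ (number : Int), Dom_make_combination number → Spec_make_combination number (make_combination number)

-- ===== LEMMAS AND PROOFS =====

theorem pvCombosA_mem_length : ∀ (k : Nat) (xs : List Int) (c : List Int),
    c ∈ pvCombosA k xs → c.length = k := by
  intro k
  induction k with
  | zero => intro xs c h; simp [pvCombosA] at h; simp [h]
  | succ n ih =>
    intro xs
    induction xs with
    | nil => intro c h; simp [pvCombosA] at h
    | cons x xs ihx =>
      intro c h
      simp only [pvCombosA, List.mem_append, List.mem_map] at h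
      rcases h with ⟨d, hd, rfl⟩ | h
      · simp [ih xs d hd]
      · exact ihx c h

theorem pvCombosA_one (xs : List Int) : pvCombosA 1 xs = xs.map (fun i => [i]) := by
  induction xs with
  | nil => simp [pvCombosA]
  | cons x xs ih => simp [pvCombosA, ih]

theorem pvCombosA_nil_of_lt : ∀ (k : Nat) (xs : List Int), xs.length < k → pvCombosA k xs = [] := by
  intro k
  induction k with
  | zero => intro xs h; omega
  | succ n ih =>
    intro xs
    induction xs with
    | nil => intro _; rfl
    | cons x xs ihx =>
      intro h
      simp only [List.length_cons] at h
      simp only [pvCombosA, ih xs (by omega), List.map_nil, List.nil_append]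
      exact ihx (by omega)

theorem pvCombosA_ne_nil_of_le : ∀ (k : Nat) (xs : List Int), k ≤ xs.length → pvCombosA k xs ≠ [] := by
  intro k
  induction k with
  | zero => intro xs _; simp [pvCombosA]
  | succ n ih =>
    intro xs
    induction xs with
    | nil => intro h; simp at h
    | cons x xs ihx =>
      intro h
      simp only [List.length_cons] at h
      simp only [pvCombosA, ne_eq, List.append_eq_nil_iff, List.map_eq_nil_iff, not_and_or]
      left
      exact ih xs (by omega)

theorem pvExtend_cons (number : Int) (s : Int) (c : List Int) (h : c ≠ []) :
    pvExtend number (s :: c) = (pvExtend number c).map (fun l => s :: l) := by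
  obtain ⟨d, ds, rfl⟩ := List.exists_cons_of_ne_nil h
  unfold pvExtend
  rw [List.getLast?_cons_cons]
  simp [List.map_map, Function.comp_def]

-- each next length is obtained by extending every combination of the previous length
theorem pvCombosA_step (number : Int) : ∀ (k : Nat) (s : Int),
    pvCombosA (k + 2) (PySem.List.pyRange s number 1)
      = (pvCombosA (k + 1) (PySem.List.pyRange s number 1)).flatMap (pvExtend number) := by
  intro k
  induction k with
  | zero =>
    intro s
    -- inner induction on the range fuel
    have main : ∀ (f : Nat) (s : Int), (number - s).toNat = f →
        pvCombosA 2 (PySem.List.pyRange s number 1)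
          = (pvCombosA 1 (PySem.List.pyRange s number 1)).flatMap (pvExtend number) := by
      intro f
      induction f with
      | zero =>
        intro s hf
        rw [PySem.List.pyRange_one_eq_nil (by omega)]
        simp [pvCombosA]
      | succ f ihf =>
        intro s hf
        rw [PySem.List.pyRange_one_cons (by omega)]
        show pvCombosA 2 _ = _
        rw [pvCombosA, pvCombosA_one, pvCombosA_one, List.map_cons, List.flatMap_cons,
          ihf (s + 1) (by omega), pvCombosA_one]
        simp [pvExtend, List.map_map, Function.comp_def]
    exact main (number - s).toNat s rfl
  | succ k ih =>
    have main : ∀ (f : Nat) (s : Int), (number - s).toNat = f →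
        pvCombosA (k + 3) (PySem.List.pyRange s number 1)
          = (pvCombosA (k + 2) (PySem.List.pyRange s number 1)).flatMap (pvExtend number) := by
      intro f
      induction f with
      | zero =>
        intro s hf
        rw [PySem.List.pyRange_one_eq_nil (by omega)]
        simp [pvCombosA]
      | succ f ihf =>
        intro s hf
        rw [PySem.List.pyRange_one_cons (by omega)]
        show pvCombosA (k + 3) (s :: _) = (pvCombosA (k + 2) (s :: _)).flatMap (pvExtend number)
        rw [show k + 3 = (k + 2) + 1 from rfl, pvCombosA, pvCombosA]
        rw [List.flatMap_append, ← ihf (s + 1) (by omega)]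
        congr 1
        -- map (s :: ·) (pvCombosA (k+2) L) = flatMap pvExtend (map (s :: ·) (pvCombosA (k+1) L))
        rw [ih (s + 1), List.flatMap_map]
        have h1 : (pvCombosA (k + 1) (PySem.List.pyRange (s + 1) number 1)).flatMap
              (fun a => pvExtend number (s :: a))
            = (pvCombosA (k + 1) (PySem.List.pyRange (s + 1) number 1)).flatMap
              (fun a => (pvExtend number a).map (fun l => s :: l)) := by
          apply List.flatMap_congr
          intro c hc
          have hne : c ≠ [] := by
            have := pvCombosA_mem_length (k + 1) _ c hc
            intro h; rw [h] at this; simp at this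
          rw [pvExtend_cons number s c hne]
        rw [h1, ← List.map_flatMap]
    intro s
    exact main (number - s).toNat s rfl

theorem pvLayers_inv (number : Int) (hnum : 0 ≤ number) :
    ∀ (fuel k : Nat), 1 ≤ k → number.toNat + 1 - k ≤ fuel → ∀ (result : List (List Int)),
      pvLayers number fuel result (pvCombosA k (PySem.List.pyRange 0 number 1))
        = result ++ (PySem.List.pyRange (k : Int) (number + 1) 1).flatMap
            (fun len => pvCombosA len.toNat (PySem.List.pyRange 0 number 1)) := by
  intro fuel
  induction fuel with
  | zero =>
    intro k hk hfuel result
    have hlen : (PySem.List.pyRange 0 number 1).length = number.toNat := by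
      simp [PySem.List.length_pyRange_one]
    have hr : PySem.List.pyRange (k : Int) (number + 1) 1 = [] :=
      PySem.List.pyRange_one_eq_nil (by omega)
    rw [pvLayers, hr]
    simp
  | succ fuel ih =>
    intro k hk hfuel result
    have hlen : (PySem.List.pyRange 0 number 1).length = number.toNat := by
      simp [PySem.List.length_pyRange_one]
    by_cases hcase : k ≤ number.toNat
    · rw [pvLayers, if_neg (pvCombosA_ne_nil_of_le k _ (by omega))]
      have hstep : (pvCombosA k (PySem.List.pyRange 0 number 1)).flatMap (pvExtend number)
          = pvCombosA (k + 1) (PySem.List.pyRange 0 number 1) := by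
        obtain ⟨k', rfl⟩ : ∃ k', k = k' + 1 := ⟨k - 1, by omega⟩
        exact (pvCombosA_step number k' 0).symm
      rw [hstep, ih (k + 1) (by omega) (by omega) (result ++ _)]
      have hr : PySem.List.pyRange (k : Int) (number + 1) 1
          = (k : Int) :: PySem.List.pyRange ((k : Int) + 1) (number + 1) 1 :=
        PySem.List.pyRange_one_cons (by omega)
      rw [hr]
      simp only [List.flatMap_cons, Int.toNat_natCast]
      push_cast
      simp
    · have hr : PySem.List.pyRange (k : Int) (number + 1) 1 = [] :=
        PySem.List.pyRange_one_eq_nil (by omega)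
      rw [pvLayers, if_pos (pvCombosA_nil_of_lt k _ (by omega)), hr]
      simp

-- ===== VERDICT (by name: the statement is the Claim_ definition above) =====
theorem make_combination_spec : Claim_equal_make_combination := by
  intro number _
  unfold Spec_make_combination make_combination make_combination_alt
  simp only [PySem.List.foldl_append_singleton_eq_self]
  rw [PySem.List.foldl_append_eq_flatMap]
  simp only [List.nil_append]
  by_cases hnum : 0 < number
  · rw [← pvCombosA_one, pvCombosA_one]
    rw [← pvCombosA_one (PySem.List.pyRange 0 number 1)]
    rw [pvLayers_inv number (by omega) (number.toNat + 1) 1 (by omega) (by omega) []]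
    simp
  · rw [PySem.List.pyRange_one_eq_nil (show number + 1 ≤ 1 by omega),
      PySem.List.pyRange_one_eq_nil (show number ≤ 0 by omega)]
    simp [pvLayers]
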